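-- pv_equiv track=rewrite | github.com/len-dali/ejercicios_.python | ejercicios_python/Funciones/ejercicio_11.py | calcular_dia_juliano
-- ===== SOURCE A (Python) =====
-- def calcular_dia_juliano(d, m, a):
--
--     dias_mes = [31, 28, 31, 30, 31, 30,
--                 31, 31, 30, 31, 30, 31]
--
--
--     if (a % 4 == 0 and a % 100 != 0) or (a % 400 == 0):
--         dias_mes[1] = 29
--
--     dia_juliano = d
--
--     for i in range(m - 1):
--         dia_juliano += dias_mes[i]
--
--     return dia_juliano
-- ===== SOURCE B (Python) =====
-- _CUMUL = [0, 31, 59, 90, 120, 151, 181, 212, 243, 273, 304, 334, 365]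
--
-- def calcular_dia_juliano(d, m, a):
--     if m <= 1:
--         return d
--     bisiesto = (a % 4 == 0 and a % 100 != 0) or (a % 400 == 0)
--     return d + _CUMUL[m - 1] + (1 if bisiesto and m > 2 else 0)
-- ===== Notes on version B (the rewrite author's own statement) =====
-- stated objective: simpler
-- what changed: Replaces the per-month summing loop over a (possibly mutated) month-length list with a constant 13-entry cumulative prefix table plus a single leap-day adjustment, so the result is one table lookup and an addition.
import Mathlib
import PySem

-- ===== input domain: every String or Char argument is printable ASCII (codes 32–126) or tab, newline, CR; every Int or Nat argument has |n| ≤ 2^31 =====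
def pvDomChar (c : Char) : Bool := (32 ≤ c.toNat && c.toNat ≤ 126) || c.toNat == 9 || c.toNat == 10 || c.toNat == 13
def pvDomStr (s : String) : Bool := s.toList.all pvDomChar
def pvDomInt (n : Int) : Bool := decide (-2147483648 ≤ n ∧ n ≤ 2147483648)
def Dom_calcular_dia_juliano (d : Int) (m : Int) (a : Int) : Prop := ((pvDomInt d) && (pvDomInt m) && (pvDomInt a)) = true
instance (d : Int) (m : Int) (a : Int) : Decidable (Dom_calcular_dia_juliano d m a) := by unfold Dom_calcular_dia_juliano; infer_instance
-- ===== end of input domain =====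

-- B replaces A's summing loop by a constant cumulative-days table lookup plus a leap adjustment (simpler).

-- ===== PORT A =====
-- literal transliteration: build the month-length list, mutate February on leap years,
-- then sum dias_mes[i] for i in range(m-1).  pyGetD's default is never used inside Pre_
-- (indices there are in range), which is where the port is exact.
def calcular_dia_juliano (d : Int) (m : Int) (a : Int) : Int :=
  let dias_mes : List Int := [31, 28, 31, 30, 31, 30, 31, 31, 30, 31, 30, 31]
  let dias_mes := if (PySem.Int.mod a 4 == 0 && !(PySem.Int.mod a 100 == 0)) || PySem.Int.mod a 400 == 0
                  then PySem.List.pySetD dias_mes 1 29 else dias_mes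
  (PySem.List.pyRange 0 (m - 1) 1).foldl (fun dia_juliano i => dia_juliano + PySem.List.pyGetD dias_mes i 0) d

-- ===== PORT B =====
def pvCumul : List Int := [0, 31, 59, 90, 120, 151, 181, 212, 243, 273, 304, 334, 365]

def calcular_dia_juliano_alt (d : Int) (m : Int) (a : Int) : Int :=
  if m ≤ 1 then d
  else
    let bisiesto := (PySem.Int.mod a 4 == 0 && !(PySem.Int.mod a 100 == 0)) || PySem.Int.mod a 400 == 0
    d + PySem.List.pyGetD pvCumul (m - 1) 0 + (if bisiesto && decide (m > 2) then 1 else 0)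

-- ===== PRECONDITION & SPEC =====
-- Pre_ excludes exactly m ≥ 14, where the Python A (and B) raise IndexError on the list index.
def Pre_calcular_dia_juliano (d : Int) (m : Int) (a : Int) : Prop := m ≤ 13
instance (d : Int) (m : Int) (a : Int) : Decidable (Pre_calcular_dia_juliano d m a) := by unfold Pre_calcular_dia_juliano; infer_instance
def pvWitness_calcular_dia_juliano : Int × Int × Int := (15, 3, 2024)

def Spec_calcular_dia_juliano (d : Int) (m : Int) (a : Int) (out : Int) : Prop := out = calcular_dia_juliano_alt d m a
instance (d : Int) (m : Int) (a : Int) (out : Int) : Decidable (Spec_calcular_dia_juliano d m a out) := by unfold Spec_calcular_dia_juliano; infer_instance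

-- ===== CLAIM (what is proved, stated in full; the proofs are below) =====
def Claim_equal_calcular_dia_juliano : Prop := ∀ (d : Int) (m : Int) (a : Int), Dom_calcular_dia_juliano d m a → Pre_calcular_dia_juliano d m a → Spec_calcular_dia_juliano d m a (calcular_dia_juliano d m a)

-- ===== LEMMAS AND PROOFS =====
theorem calcular_dia_juliano_eq (d m a : Int) (hm : m ≤ 13) :
    calcular_dia_juliano d m a = calcular_dia_juliano_alt d m a := by
  by_cases h : (4 ∣ a ∧ ¬ (100:Int) ∣ a) ∨ (400:Int) ∣ a <;>
  by_cases h1 : m ≤ 1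
  · simp [calcular_dia_juliano, calcular_dia_juliano_alt, h, h1,
      PySem.List.pyRange_one_eq_nil (by omega : m - 1 ≤ 0)]
  · interval_cases m <;>
      simp [calcular_dia_juliano, calcular_dia_juliano_alt, h, pvCumul, List.range_succ,
        PySem.List.pyRange, PySem.List.pySetD, PySem.List.pySet?, PySem.List.pyGetD, PySem.List.pyGet?,
        PySem.List.pyIdx?] <;> omega
  · simp [calcular_dia_juliano, calcular_dia_juliano_alt, h, h1,
      PySem.List.pyRange_one_eq_nil (by omega : m - 1 ≤ 0)]
  · interval_cases m <;>
      simp [calcular_dia_juliano, calcular_dia_juliano_alt, h, pvCumul, List.range_succ,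
        PySem.List.pyRange, PySem.List.pyGetD, PySem.List.pyGet?,
        PySem.List.pyIdx?] <;> omega

-- ===== VERDICT (by name: the statement is the Claim_ definition above) =====
theorem calcular_dia_juliano_spec : Claim_equal_calcular_dia_juliano := by
  intro d m a _ hpre
  exact calcular_dia_juliano_eq d m a hpre
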